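-- pv_equiv track=rewrite | github.com/plaunezkiy/ttds | utils/processing.py | generate_vocab_growth_data
-- ===== SOURCE A (Python) =====
-- from typing import List
--
-- def generate_vocab_growth_data(tokens: List[str], n: int):
--     """
--     Computes the size of unique vocab of a text every `n` words
--     """
--     # collection = tokenize_text(text)
--     data = []
--     vocab = set()
--     for i, token in enumerate(tokens):
--         if i % n == 0:
--             data.append([i, len(vocab)])
--         vocab.add(token)
--     return data
-- ===== SOURCE B (Python) =====
-- from typing import List
--
-- def generate_vocab_growth_data(tokens: List[str], n: int):
--     """
--     Computes the size of unique vocab of a text every `n` words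
--     (prefix-recomputation strategy: no running set is maintained).
--     """
--     data = []
--     for i in range(len(tokens)):
--         if i % n == 0:
--             data.append([i, len(set(tokens[:i]))])
--     return data
-- ===== Notes on version B (the rewrite author's own statement) =====
-- stated objective: alternative
-- what changed: Replaces the single incremental pass that grows one running vocabulary set with an index loop that, at each sampled index i, recomputes the vocabulary size from scratch as len(set(tokens[:i])); no running state is kept across iterations.
import Mathlib
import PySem

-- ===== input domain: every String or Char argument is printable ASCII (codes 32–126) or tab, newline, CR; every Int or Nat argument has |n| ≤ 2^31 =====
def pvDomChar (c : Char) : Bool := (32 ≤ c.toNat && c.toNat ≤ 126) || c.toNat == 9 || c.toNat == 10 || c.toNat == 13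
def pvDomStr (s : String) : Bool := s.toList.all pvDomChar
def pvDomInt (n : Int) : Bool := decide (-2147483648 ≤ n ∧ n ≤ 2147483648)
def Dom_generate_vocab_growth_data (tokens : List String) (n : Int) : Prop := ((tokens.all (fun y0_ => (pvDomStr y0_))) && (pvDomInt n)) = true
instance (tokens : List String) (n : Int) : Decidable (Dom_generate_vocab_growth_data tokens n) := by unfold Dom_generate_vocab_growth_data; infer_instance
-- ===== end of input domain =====

-- B replaces A's incremental running-set pass by recomputing the vocabulary size
-- from the prefix tokens[:i] at each sampled index (objective: alternative, same output).

-- ===== PORT A =====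
-- A: one pass over enumerate(tokens) carrying (data, vocab); record before adding.
def generate_vocab_growth_data (tokens : List String) (n : Int) : List (List Int) :=
  ((PySem.List.enumerate tokens).foldl
    (fun (st : List (List Int) × PySem.Set String) p =>
      ((if PySem.Int.mod p.1 n = 0 then st.1 ++ [[p.1, PySem.Set.len st.2]] else st.1),
       PySem.Set.add st.2 p.2))
    ([], PySem.Set.empty)).1

-- ===== PORT B =====
-- B: loop over indices; at each sampled i recompute len(set(tokens[:i])) freshly.
def generate_vocab_growth_data_alt (tokens : List String) (n : Int) : List (List Int) :=
  (PySem.List.pyRange 0 (tokens.length : Int) 1).foldl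
    (fun data i =>
      if PySem.Int.mod i n = 0
      then data ++ [[i, PySem.Set.len (PySem.Set.ofList (PySem.List.slice tokens none (some i)))]]
      else data) []

-- ===== PRECONDITION & SPEC =====
-- Pre_ excludes only n = 0 with nonempty tokens, where Python A (and B) raise ZeroDivisionError at i % n.
def Pre_generate_vocab_growth_data (tokens : List String) (n : Int) : Prop :=
  n ≠ 0 ∨ tokens = []
instance (tokens : List String) (n : Int) : Decidable (Pre_generate_vocab_growth_data tokens n) := by
  unfold Pre_generate_vocab_growth_data; infer_instance

def pvWitness_generate_vocab_growth_data : List String × Int := (["a", "b", "a", "c"], 2)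

def Spec_generate_vocab_growth_data (tokens : List String) (n : Int) (out : List (List Int)) : Prop := out = generate_vocab_growth_data_alt tokens n
instance (tokens : List String) (n : Int) (out : List (List Int)) : Decidable (Spec_generate_vocab_growth_data tokens n out) := by unfold Spec_generate_vocab_growth_data; infer_instance

-- ===== CLAIM (what is proved, stated in full; the proofs are below) =====
def Claim_equal_generate_vocab_growth_data : Prop := ∀ (tokens : List String) (n : Int), Dom_generate_vocab_growth_data tokens n → Pre_generate_vocab_growth_data tokens n → Spec_generate_vocab_growth_data tokens n (generate_vocab_growth_data tokens n)

-- ===== LEMMAS AND PROOFS =====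

-- A's loop state after consuming xs: (B's answer on xs, the set of xs's elements).
theorem vocab_growth_loop_inv (n : Int) (xs : List String) :
    (PySem.List.enumerate xs).foldl
      (fun (st : List (List Int) × PySem.Set String) p =>
        ((if PySem.Int.mod p.1 n = 0 then st.1 ++ [[p.1, PySem.Set.len st.2]] else st.1),
         PySem.Set.add st.2 p.2))
      ([], PySem.Set.empty)
    = (generate_vocab_growth_data_alt xs n, PySem.Set.ofList xs) := by
  induction xs using List.reverseRecOn with
  | nil =>
      simp [generate_vocab_growth_data_alt, PySem.List.enumerate_nil,
            PySem.List.pyRange_one_eq_nil, PySem.Set.ofList]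
  | append_singleton xs x ih =>
      rw [PySem.List.enumerate_append, List.foldl_append, ih]
      rw [PySem.List.enumerate_cons, PySem.List.enumerate_nil]
      simp only [List.foldl_cons, List.foldl_nil]
      have hlen : PySem.Set.ofList (xs ++ [x]) = PySem.Set.add (PySem.Set.ofList xs) x :=
        PySem.Set.ofList_append_singleton xs x
      have halt : generate_vocab_growth_data_alt (xs ++ [x]) n
          = (if PySem.Int.mod (xs.length : Int) n = 0
             then generate_vocab_growth_data_alt xs n
                ++ [[(xs.length : Int), PySem.Set.len (PySem.Set.ofList xs)]]
             else generate_vocab_growth_data_alt xs n) := by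
        unfold generate_vocab_growth_data_alt
        have hrange : PySem.List.pyRange 0 ((xs ++ [x]).length : Int) 1
            = PySem.List.pyRange 0 (xs.length : Int) 1 ++ [(xs.length : Int)] := by
          have : ((xs ++ [x]).length : Int) = (xs.length : Int) + 1 := by
            simp
          rw [this, PySem.List.pyRange_one_succ_right (by positivity)]
        rw [hrange, List.foldl_append]
        have hcongr :
            (PySem.List.pyRange 0 (xs.length : Int) 1).foldl
              (fun data i =>
                if PySem.Int.mod i n = 0
                then data ++ [[i, PySem.Set.len (PySem.Set.ofList (PySem.List.slice (xs ++ [x]) none (some i)))]]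
                else data) []
            = (PySem.List.pyRange 0 (xs.length : Int) 1).foldl
              (fun data i =>
                if PySem.Int.mod i n = 0
                then data ++ [[i, PySem.Set.len (PySem.Set.ofList (PySem.List.slice xs none (some i)))]]
                else data) [] := by
          apply PySem.List.foldl_congr_mem
          intro acc i hi
          have hi' := (PySem.List.mem_pyRange_one).1 hi
          have hsl : PySem.List.slice (xs ++ [x]) none (some i)
              = PySem.List.slice xs none (some i) := by
            rw [PySem.List.slice_to _ hi'.1, PySem.List.slice_to _ hi'.1]
            exact List.take_append_of_le_length (by omega)
          rw [hsl]
        rw [hcongr]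
        simp only [List.foldl_cons, List.foldl_nil]
        have hslast : PySem.List.slice (xs ++ [x]) none (some (xs.length : Int)) = xs := by
          rw [PySem.List.slice_to _ (by positivity)]
          simp
        rw [hslast]
      rw [halt, hlen]
      by_cases h : PySem.Int.mod (xs.length : Int) n = 0 <;> simp [h]

-- ===== VERDICT (by name: the statement is the Claim_ definition above) =====
theorem generate_vocab_growth_data_spec : Claim_equal_generate_vocab_growth_data := by
  intro tokens n _ _
  unfold Spec_generate_vocab_growth_data generate_vocab_growth_data
  rw [vocab_growth_loop_inv]
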